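-- pv_equiv track=rewrite | github.com/hjamet/multi-agents-mcp | src/core/server.py | _get_new_messages_notification
-- ===== SOURCE A (Python) =====
-- from typing import List, Optional
--
-- def _get_new_messages_notification(agent_name: str, messages: List[dict]) -> str:
--     """
--     Analyzes messages to count new ones since agent's last message.
--     """
--     last_my_index = -1
--     for i, m in enumerate(messages):
--         if m.get("from") == agent_name:
--             last_my_index = i
--
--     new_messages = messages[last_my_index + 1:]
--
--     senders = set()
--     count = 0
--     for m in new_messages:
--         sender = m.get("from")
--         # Exclude System unless it's a real notification? No, user said "de Y, Z et W"
--         if sender and sender != agent_name and sender != "System":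
--             # Map 'User' to 'l'utilisateur' if in French context?
--             # For now, just use the name.
--             senders.add(sender)
--             count += 1
--
--     if count == 0:
--         return f"No new messages. Review the Conversation History above to refresh your context."
--
--     senders_list = sorted(list(senders))
--     if len(senders_list) > 1:
--         senders_str = ", ".join(senders_list[:-1]) + f" et {senders_list[-1]}"
--     else:
--         senders_str = senders_list[0]
--
--     return f"CRITICAL: You have received {count} new messages from {senders_str}.\nMANDATORY PROTOCOL:\n1. READ the 'LATEST CONVERSATION HISTORY' section above carefully.\n2. If you need more context, you may use `read_file` on logs, but usually the last 10 messages are enough."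
-- ===== SOURCE B (Python) =====
-- def _get_new_messages_notification(agent_name: str, messages: list) -> str:
--     """Single reverse pass with early stop at the agent's last own message."""
--     senders = set()
--     count = 0
--     for m in reversed(messages):
--         sender = m.get("from")
--         if sender == agent_name:
--             break
--         if sender and sender != "System":
--             senders.add(sender)
--             count += 1
--
--     if count == 0:
--         return "No new messages. Review the Conversation History above to refresh your context."
--
--     senders_list = sorted(senders)
--     if len(senders_list) == 1:
--         senders_str = senders_list[0]
--     else:
--         senders_str = ", ".join(senders_list[:-1]) + " et " + senders_list[-1]
--
--     return f"CRITICAL: You have received {count} new messages from {senders_str}.\nMANDATORY PROTOCOL:\n1. READ the 'LATEST CONVERSATION HISTORY' section above carefully.\n2. If you need more context, you may use `read_file` on logs, but usually the last 10 messages are enough."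
-- ===== Notes on version B (the rewrite author's own statement) =====
-- stated objective: simpler
-- what changed: Replaces A's two-phase structure (forward enumerate scan to find the last own-message index, then slice, then a second forward scan of the suffix) by one reverse loop that breaks at the agent's last message and counts/collects senders on the way; the explicit '!= agent_name' filter becomes redundant and is dropped.
import Mathlib
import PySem

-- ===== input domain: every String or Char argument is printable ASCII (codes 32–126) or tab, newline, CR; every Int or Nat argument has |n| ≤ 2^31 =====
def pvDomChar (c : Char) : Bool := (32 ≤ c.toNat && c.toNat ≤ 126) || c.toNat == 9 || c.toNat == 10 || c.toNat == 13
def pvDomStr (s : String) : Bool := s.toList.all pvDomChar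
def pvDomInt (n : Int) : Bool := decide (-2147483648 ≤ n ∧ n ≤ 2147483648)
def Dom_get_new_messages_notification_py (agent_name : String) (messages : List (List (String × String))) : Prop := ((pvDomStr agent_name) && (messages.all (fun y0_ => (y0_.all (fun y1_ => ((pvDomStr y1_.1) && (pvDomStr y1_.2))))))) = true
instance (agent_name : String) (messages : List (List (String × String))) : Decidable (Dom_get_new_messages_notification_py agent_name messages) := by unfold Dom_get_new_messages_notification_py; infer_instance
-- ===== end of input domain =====

-- B replaces A's two-phase structure (find last own-message index, slice, rescan the suffix)
-- by one reverse loop that breaks at the agent's last message; equally fast, simpler.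

-- ===== PORT A =====
def get_new_messages_notification_py (agent_name : String) (messages : List (List (String × String))) : String :=
  let last_my_index : Int :=
    (PySem.List.enumerate messages 0).foldl
      (fun acc im =>
        if PySem.Dict.get? (PySem.Dict.mk im.2) "from" = some agent_name then im.1 else acc)
      (-1)
  let new_messages := PySem.List.slice messages (some (last_my_index + 1)) none
  let sc : PySem.Set String × Int :=
    new_messages.foldl
      (fun sc m =>
        match PySem.Dict.get? (PySem.Dict.mk m) "from" with
        | some sender =>
          if sender ≠ "" ∧ sender ≠ agent_name ∧ sender ≠ "System" then
            (PySem.Set.add sc.1 sender, sc.2 + 1)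
          else sc
        | none => sc)
      (PySem.Set.empty, 0)
  if sc.2 = 0 then
    "No new messages. Review the Conversation History above to refresh your context."
  else
    let senders_list := PySem.List.sorted sc.1 (fun x => x) false
    let senders_str :=
      if senders_list.length > 1 then
        PySem.Str.join ", " (PySem.List.slice senders_list none (some (-1)))
          ++ " et " ++ PySem.List.pyGetD senders_list (-1) ""
      else
        PySem.List.pyGetD senders_list 0 ""
    "CRITICAL: You have received " ++ PySem.Int.toStr sc.2 ++ " new messages from "
      ++ senders_str
      ++ ".\nMANDATORY PROTOCOL:\n1. READ the 'LATEST CONVERSATION HISTORY' section above carefully.\n2. If you need more context, you may use `read_file` on logs, but usually the last 10 messages are enough."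

-- ===== PORT B =====
-- the reverse loop of Source B: walk the reversed message list, break at the agent's own message
def pvAltLoop (agent_name : String) :
    List (List (String × String)) → PySem.Set String → Int → PySem.Set String × Int
  | [], senders, count => (senders, count)
  | m :: rest, senders, count =>
    match PySem.Dict.get? (PySem.Dict.mk m) "from" with
    | some sender =>
      if sender = agent_name then (senders, count)
      else if sender ≠ "" ∧ sender ≠ "System" then
        pvAltLoop agent_name rest (PySem.Set.add senders sender) (count + 1)
      else pvAltLoop agent_name rest senders count
    | none => pvAltLoop agent_name rest senders count

def get_new_messages_notification_py_alt (agent_name : String) (messages : List (List (String × String))) : String :=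
  let sc := pvAltLoop agent_name messages.reverse PySem.Set.empty 0
  if sc.2 = 0 then
    "No new messages. Review the Conversation History above to refresh your context."
  else
    let senders_list := PySem.List.sorted sc.1 (fun x => x) false
    let senders_str :=
      if senders_list.length = 1 then
        PySem.List.pyGetD senders_list 0 ""
      else
        PySem.Str.join ", " (PySem.List.slice senders_list none (some (-1)))
          ++ " et " ++ PySem.List.pyGetD senders_list (-1) ""
    "CRITICAL: You have received " ++ PySem.Int.toStr sc.2 ++ " new messages from "
      ++ senders_str
      ++ ".\nMANDATORY PROTOCOL:\n1. READ the 'LATEST CONVERSATION HISTORY' section above carefully.\n2. If you need more context, you may use `read_file` on logs, but usually the last 10 messages are enough."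

-- ===== PRECONDITION & SPEC =====
def Spec_get_new_messages_notification_py (agent_name : String) (messages : List (List (String × String))) (out : String) : Prop := out = get_new_messages_notification_py_alt agent_name messages
instance (agent_name : String) (messages : List (List (String × String))) (out : String) : Decidable (Spec_get_new_messages_notification_py agent_name messages out) := by unfold Spec_get_new_messages_notification_py; infer_instance

-- ===== CLAIM (what is proved, stated in full; the proofs are below) =====
def Claim_equal_get_new_messages_notification_py : Prop := ∀ (agent_name : String) (messages : List (List (String × String))), Dom_get_new_messages_notification_py agent_name messages → Spec_get_new_messages_notification_py agent_name messages (get_new_messages_notification_py agent_name messages)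

-- ===== LEMMAS AND PROOFS =====

-- A's inner-loop body, named for the proofs
def pvStep (ag : String) (sc : PySem.Set String × Int) (m : List (String × String)) :
    PySem.Set String × Int :=
  match PySem.Dict.get? (PySem.Dict.mk m) "from" with
  | some sender =>
    if sender ≠ "" ∧ sender ≠ ag ∧ sender ≠ "System" then
      (PySem.Set.add sc.1 sender, sc.2 + 1)
    else sc
  | none => sc

-- the sender a message contributes, if any
def pvGood (ag : String) (m : List (String × String)) : Option String :=
  match PySem.Dict.get? (PySem.Dict.mk m) "from" with
  | some s => if s ≠ "" ∧ s ≠ ag ∧ s ≠ "System" then some s else none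
  | none => none

-- "not the agent's own message"
def pvQ (ag : String) (m : List (String × String)) : Bool :=
  decide (PySem.Dict.get? (PySem.Dict.mk m) "from" ≠ some ag)

-- A's last-index fold, named
def pvLast (ag : String) (ms : List (List (String × String))) : Int :=
  (PySem.List.enumerate ms 0).foldl
    (fun acc im =>
      if PySem.Dict.get? (PySem.Dict.mk im.2) "from" = some ag then im.1 else acc)
    (-1)

def pvNoMsg : String :=
  "No new messages. Review the Conversation History above to refresh your context."

def pvMsg (n : Int) (senders_str : String) : String :=
  "CRITICAL: You have received " ++ PySem.Int.toStr n ++ " new messages from "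
    ++ senders_str
    ++ ".\nMANDATORY PROTOCOL:\n1. READ the 'LATEST CONVERSATION HISTORY' section above carefully.\n2. If you need more context, you may use `read_file` on logs, but usually the last 10 messages are enough."

def pvFmtA (l : List String) : String :=
  if l.length > 1 then
    PySem.Str.join ", " (PySem.List.slice l none (some (-1)))
      ++ " et " ++ PySem.List.pyGetD l (-1) ""
  else PySem.List.pyGetD l 0 ""

def pvFmtB (l : List String) : String :=
  if l.length = 1 then PySem.List.pyGetD l 0 ""
  else
    PySem.Str.join ", " (PySem.List.slice l none (some (-1)))
      ++ " et " ++ PySem.List.pyGetD l (-1) ""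

def pvFinA (sc : PySem.Set String × Int) : String :=
  if sc.2 = 0 then pvNoMsg
  else pvMsg sc.2 (pvFmtA (PySem.List.sorted sc.1 (fun x => x) false))

def pvFinB (sc : PySem.Set String × Int) : String :=
  if sc.2 = 0 then pvNoMsg
  else pvMsg sc.2 (pvFmtB (PySem.List.sorted sc.1 (fun x => x) false))

theorem pvA_eq (ag : String) (ms : List (List (String × String))) :
    get_new_messages_notification_py ag ms
      = pvFinA ((PySem.List.slice ms (some (pvLast ag ms + 1)) none).foldl
          (pvStep ag) (PySem.Set.empty, 0)) := rfl

theorem pvB_eq (ag : String) (ms : List (List (String × String))) :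
    get_new_messages_notification_py_alt ag ms
      = pvFinB (pvAltLoop ag ms.reverse PySem.Set.empty 0) := rfl

theorem pvStep_eq_good (ag : String) (sc : PySem.Set String × Int) (m : List (String × String)) :
    pvStep ag sc m = match pvGood ag m with
      | some x => (PySem.Set.add sc.1 x, sc.2 + 1)
      | none => sc := by
  unfold pvStep pvGood
  cases PySem.Dict.get? (PySem.Dict.mk m) "from" with
  | none => rfl
  | some s => by_cases h : s ≠ "" ∧ s ≠ ag ∧ s ≠ "System" <;> simp [h]

-- characterisation of the accumulating fold
theorem pvFold_char (ag : String) (l : List (List (String × String))) :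
    ∀ sc : PySem.Set String × Int,
      (l.foldl (pvStep ag) sc).2 = sc.2 + ((l.filterMap (pvGood ag)).length : Int) ∧
      (∀ x, x ∈ (l.foldl (pvStep ag) sc).1 ↔ x ∈ sc.1 ∨ x ∈ l.filterMap (pvGood ag)) ∧
      (sc.1.Nodup → (l.foldl (pvStep ag) sc).1.Nodup) := by
  induction l with
  | nil => intro sc; simp
  | cons m rest ih =>
    intro sc
    rw [List.foldl_cons, pvStep_eq_good]
    cases hg : pvGood ag m with
    | none =>
      obtain ⟨h1, h2, h3⟩ := ih sc
      refine ⟨?_, ?_, h3⟩ <;> simp [hg, h1, h2]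
    | some x =>
      obtain ⟨h1, h2, h3⟩ := ih (PySem.Set.add sc.1 x, sc.2 + 1)
      refine ⟨?_, ?_, ?_⟩
      · rw [h1]; simp [hg]; ring
      · intro y
        rw [h2]
        simp [hg, PySem.Set.mem_add]
        tauto
      · intro hnd; exact h3 (PySem.Set.nodup_add _ _ hnd)

-- B's reverse loop is A's fold over the prefix of not-own messages
theorem pvAltLoop_eq (ag : String) (xs : List (List (String × String))) :
    ∀ senders count, pvAltLoop ag xs senders count
      = (xs.takeWhile (pvQ ag)).foldl (pvStep ag) (senders, count) := by
  induction xs with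
  | nil => intro s c; rfl
  | cons m rest ih =>
    intro s c
    unfold pvAltLoop
    cases hg : PySem.Dict.get? (PySem.Dict.mk m) "from" with
    | none =>
      have hq : pvQ ag m = true := by simp [pvQ, hg]
      rw [List.takeWhile_cons_of_pos hq, List.foldl_cons]
      have hs : pvStep ag (s, c) m = (s, c) := by simp only [pvStep, hg]
      rw [hs, ih]
    | some sender =>
      by_cases ha : sender = ag
      · have hq : pvQ ag m = false := by simp [pvQ, hg, ha]
        rw [List.takeWhile_cons_of_neg (by simp [hq])]
        simp [ha]
      · have hq : pvQ ag m = true := by simp [pvQ, hg, ha]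
        rw [List.takeWhile_cons_of_pos hq, List.foldl_cons]
        have hcond : (sender ≠ "" ∧ sender ≠ ag ∧ sender ≠ "System")
            ↔ (sender ≠ "" ∧ sender ≠ "System") := by tauto
        by_cases hb : sender ≠ "" ∧ sender ≠ "System"
        · have hs : pvStep ag (s, c) m = (PySem.Set.add s sender, c + 1) := by
            simp only [pvStep, hg]
            exact if_pos (hcond.mpr hb)
          simp only [if_neg ha, if_pos hb, hs, ih]
        · have hs : pvStep ag (s, c) m = (s, c) := by
            simp only [pvStep, hg]
            exact if_neg (fun h => hb (hcond.mp h))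
          simp only [if_neg ha, if_neg hb, hs, ih]

-- the suffix after the last own message is the reversed takeWhile of the reversed list
theorem pvLast_char (ag : String) (ms : List (List (String × String))) :
    0 ≤ pvLast ag ms + 1 ∧ (pvLast ag ms + 1).toNat ≤ ms.length ∧
      ms.drop (pvLast ag ms + 1).toNat = (ms.reverse.takeWhile (pvQ ag)).reverse := by
  induction ms using List.reverseRecOn with
  | nil => simp [pvLast]
  | append_singleton xs m ih =>
    obtain ⟨ih0, ih1, ih2⟩ := ih
    have henum : pvLast ag (xs ++ [m]) =
        if PySem.Dict.get? (PySem.Dict.mk m) "from" = some ag then (xs.length : Int)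
        else pvLast ag xs := by
      unfold pvLast
      rw [PySem.List.enumerate_append, List.foldl_append]
      simp [PySem.List.enumerate]
    by_cases hp : PySem.Dict.get? (PySem.Dict.mk m) "from" = some ag
    · rw [henum, if_pos hp]
      have hq : pvQ ag m = false := by simp [pvQ, hp]
      refine ⟨by positivity, by simp, ?_⟩
      have ht : ((xs.length : Int) + 1).toNat = xs.length + 1 := by omega
      rw [ht, List.reverse_append]
      simp [hq, List.drop_eq_nil_of_le]
    · rw [henum, if_neg hp]
      have hq : pvQ ag m = true := by simp [pvQ, hp]
      refine ⟨ih0, by simp; omega, ?_⟩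
      rw [List.drop_append_of_le_length ih1, ih2, List.reverse_append]
      simp [hq]

-- both renderings agree when the fold results have equal count and set contents
theorem pvFin_eq (scA scB : PySem.Set String × Int)
    (hc : scA.2 = scB.2) (hnA : scA.1.Nodup) (hnB : scB.1.Nodup)
    (hm : ∀ x, x ∈ scA.1 ↔ x ∈ scB.1)
    (hne : scB.2 ≠ 0 → scB.1 ≠ []) :
    pvFinA scA = pvFinB scB := by
  have hperm : scA.1.Perm scB.1 := (List.perm_ext_iff_of_nodup hnA hnB).mpr hm
  have hsorted : PySem.List.sorted scA.1 (fun x => x) false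
      = PySem.List.sorted scB.1 (fun x => x) false :=
    PySem.List.sorted_eq_sorted_of_perm _ _ _ (fun _ _ h => h) hperm
  unfold pvFinA pvFinB
  rw [hc, hsorted]
  by_cases hz : scB.2 = 0
  · simp [hz]
  · rw [if_neg hz, if_neg hz]
    have hperm2 : (PySem.List.sorted scB.1 (fun x => x) false).Perm scB.1 :=
      PySem.List.sorted_perm _ _ _
    have hlne : PySem.List.sorted scB.1 (fun x => x) false ≠ [] := by
      intro h
      rw [h] at hperm2
      exact hne hz hperm2.symm.eq_nil
    congr 1
    unfold pvFmtA pvFmtB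
    have h1 : 1 ≤ (PySem.List.sorted scB.1 (fun x => x) false).length :=
      List.length_pos_of_ne_nil hlne
    split_ifs with ha hb hb
    · omega
    · rfl
    · rfl
    · omega

-- ===== VERDICT (by name: the statement is the Claim_ definition above) =====
theorem get_new_messages_notification_py_spec : Claim_equal_get_new_messages_notification_py := by
  intro ag messages _
  unfold Spec_get_new_messages_notification_py
  rw [pvA_eq, pvB_eq]
  obtain ⟨h0, h1, h2⟩ := pvLast_char ag messages
  set t := messages.reverse.takeWhile (pvQ ag) with ht
  have hslice : PySem.List.slice messages (some (pvLast ag messages + 1)) none = t.reverse := by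
    rw [PySem.List.slice_from _ h0, h2]
  rw [hslice, pvAltLoop_eq]
  obtain ⟨ca, ma, na⟩ := pvFold_char ag t.reverse (PySem.Set.empty, 0)
  obtain ⟨cb, mb, nb⟩ := pvFold_char ag t (PySem.Set.empty, 0)
  set scA := t.reverse.foldl (pvStep ag) (PySem.Set.empty, 0) with hA
  set scB := t.foldl (pvStep ag) (PySem.Set.empty, 0) with hB
  have hrev : t.reverse.filterMap (pvGood ag) = (t.filterMap (pvGood ag)).reverse := by
    simp [List.filterMap_reverse]
  apply pvFin_eq
  · rw [ca, cb, hrev]; simp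
  · exact na List.nodup_nil
  · exact nb List.nodup_nil
  · intro x; rw [ma, mb, hrev]; simp
  · intro hz hnil
    apply hz
    rw [cb]
    have hfm : t.filterMap (pvGood ag) = [] := by
      by_contra hf
      obtain ⟨x, hx⟩ := List.exists_mem_of_ne_nil _ hf
      have hxm := (mb x).mpr (Or.inr hx)
      rw [hnil] at hxm; simp at hxm
    simp [hfm]
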